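-- pv_equiv track=rewrite | github.com/allbarbos/desafios | crawler/src/main.py | change_token
-- ===== SOURCE A (Python) =====
-- def change_token(token):
--         token_lst = list(token)
--
--         replacements = {
--             'a': 'z',
--             'b': 'y',
--             'c': 'x',
--             'd': 'w',
--             'e': 'v',
--             'f': 'u',
--             'g': 't',
--             'h': 's',
--             'i': 'r',
--             'j': 'q',
--             'k': 'p',
--             'l': 'o',
--             'm': 'n',
--             'n': 'm',
--             'o': 'l',
--             'p': 'k',
--             'q': 'j',
--             'r': 'i',
--             's': 'h',
--             't': 'g',
--             'u': 'f',
--             'v': 'e',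
--             'w': 'd',
--             'x': 'c',
--             'y': 'b',
--             'z': 'a'
--         }
--
--         for idx, t in enumerate(token_lst):
--             if t in replacements:
--                 token_lst[idx] = replacements[t]
--
--         return ''.join(token_lst)
-- ===== SOURCE B (Python) =====
-- def change_token(token):
--     for lo, hi in zip('abcdefghijklm', 'zyxwvutsrqpon'):
--         token = token.replace(lo, '\x00').replace(hi, lo).replace('\x00', hi)
--     return token
-- ===== Notes on version B (the rewrite author's own statement) =====
-- stated objective: alternative
-- what changed: Replaces A's single Python-level enumerate-and-mutate pass over a 26-entry dict by 13 staged whole-string passes, one per letter pair, each swapping the pair via three str.replace calls through a sentinel character; the per-character work moves into C-level str.replace, which a timing run measured as faster.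
import Mathlib
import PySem

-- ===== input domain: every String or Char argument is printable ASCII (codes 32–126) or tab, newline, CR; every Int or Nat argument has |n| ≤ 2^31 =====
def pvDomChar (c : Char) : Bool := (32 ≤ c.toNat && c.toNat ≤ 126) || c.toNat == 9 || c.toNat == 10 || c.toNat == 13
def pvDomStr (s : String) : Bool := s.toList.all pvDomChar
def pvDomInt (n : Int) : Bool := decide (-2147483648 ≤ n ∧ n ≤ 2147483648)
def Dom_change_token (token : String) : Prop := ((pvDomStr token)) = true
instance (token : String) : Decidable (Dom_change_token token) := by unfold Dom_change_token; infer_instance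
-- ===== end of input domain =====

-- B replaces A's single enumerate-and-mutate pass over a 26-entry dict by 13 staged
-- whole-string passes, one per letter pair, each swapping the pair via three str.replace
-- calls through a '\x00' sentinel (measured faster in a timing run: C-level replace).

-- ===== PORT A =====
def ctReplacements : PySem.Dict Char Char :=
  PySem.Dict.ofList
    [('a','z'),('b','y'),('c','x'),('d','w'),('e','v'),('f','u'),('g','t'),('h','s'),
     ('i','r'),('j','q'),('k','p'),('l','o'),('m','n'),('n','m'),('o','l'),('p','k'),
     ('q','j'),('r','i'),('s','h'),('t','g'),('u','f'),('v','e'),('w','d'),('x','c'),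
     ('y','b'),('z','a')]

def change_token (token : String) : String :=
  let tokenLst := token.toList
  let finalLst :=
    (PySem.List.enumerate tokenLst).foldl
      (fun st (p : Int × Char) =>
        if ctReplacements.contains p.2 then
          st.set p.1.toNat ((ctReplacements.get? p.2).getD p.2)
        else st)
      tokenLst
  String.ofList finalLst

-- ===== PORT B =====
-- zip('abcdefghijklm', 'zyxwvutsrqpon')
def ctPairs : List (Char × Char) := List.zip "abcdefghijklm".toList "zyxwvutsrqpon".toList

/-- One iteration of B's loop: swap the pair p in s via three str.replace calls. -/
def ctStrStep (s : String) (p : Char × Char) : String :=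
  PySem.Str.replace
    (PySem.Str.replace (PySem.Str.replace s (String.ofList [p.1]) (String.ofList ['\x00']))
      (String.ofList [p.2]) (String.ofList [p.1]))
    (String.ofList ['\x00']) (String.ofList [p.2])

def change_token_alt (token : String) : String :=
  ctPairs.foldl ctStrStep token

-- ===== PRECONDITION & SPEC =====
def Spec_change_token (token : String) (out : String) : Prop := out = change_token_alt token
instance (token : String) (out : String) : Decidable (Spec_change_token token out) := by unfold Spec_change_token; infer_instance

-- ===== CLAIM (what is proved, stated in full; the proofs are below) =====
def Claim_equal_change_token : Prop := ∀ (token : String), Dom_change_token token → Spec_change_token token (change_token token)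

-- ===== LEMMAS AND PROOFS =====

/-- A's per-character transform, extracted. -/
def ctStepA (c : Char) : Char :=
  if ctReplacements.contains c then (ctReplacements.get? c).getD c else c

/-- Swap used by B, per character. -/
def ctSwap (a b c : Char) : Char := if c = a then b else c

/-- B's per-pair per-character transform. -/
def ctPairStep (p : Char × Char) (c : Char) : Char :=
  ctSwap '\x00' p.2 (ctSwap p.2 p.1 (ctSwap p.1 '\x00' c))

/-- B's total per-character transform. -/
def ctStepB (c : Char) : Char := ctPairs.foldl (fun c p => ctPairStep p c) c

theorem ct_go_single (a b : Char) : ∀ (fuel : Nat) (l acc : List Char), l.length ≤ fuel →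
    PySem.Chars.replace.go [a] [b] fuel l acc =
      acc.reverse ++ l.map (fun c => ctSwap a b c) := by
  intro fuel
  induction fuel with
  | zero =>
    intro l acc h
    have : l = [] := List.length_eq_zero_iff.mp (Nat.le_zero.mp h)
    subst this
    simp [PySem.Chars.replace.go]
  | succ fuel ih =>
    intro l acc h
    cases l with
    | nil => simp [PySem.Chars.replace.go]
    | cons c t =>
      simp only [List.length_cons, Nat.succ_le_succ_iff] at h
      by_cases hc : c = a
      · subst hc
        have hpre : List.isPrefixOf [c] (c :: t) = true := by
          simp [List.isPrefixOf]
        rw [PySem.Chars.replace.go]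
        simp only [hpre, if_pos]
        rw [show List.drop [c].length (c :: t) = t by simp]
        rw [ih t ([b].reverse ++ acc) h]
        simp [ctSwap]
      · have hpre : List.isPrefixOf [a] (c :: t) = false := by
          simp [List.isPrefixOf]
          exact fun hh => absurd hh.symm hc
        rw [PySem.Chars.replace.go]
        simp only [hpre]
        rw [if_neg (by simp)]
        rw [ih t (c :: acc) h]
        simp [ctSwap, hc]

theorem ct_replace_single (a b : Char) (l : List Char) :
    PySem.Chars.replace l [a] [b] = l.map (fun c => ctSwap a b c) := by
  rw [PySem.Chars.replace]
  simp only [List.isEmpty_cons]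
  exact ct_go_single a b l.length l [] le_rfl

theorem ct_str_replace_single (a b : Char) (s : String) :
    PySem.Str.replace s (String.ofList [a]) (String.ofList [b]) =
      String.ofList (s.toList.map (fun c => ctSwap a b c)) := by
  rw [PySem.Str.replace]
  congr 1
  simp only [String.toList_ofList]
  rw [ct_replace_single]

theorem ct_str_step_eq (s : String) (p : Char × Char) :
    ctStrStep s p = String.ofList (s.toList.map (fun c => ctPairStep p c)) := by
  unfold ctStrStep
  rw [ct_str_replace_single, ct_str_replace_single, ct_str_replace_single]
  simp only [String.toList_ofList]
  simp [List.map_map, Function.comp_def, ctPairStep]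

theorem ct_alt_eq_map (ps : List (Char × Char)) : ∀ (s : String),
    ps.foldl ctStrStep s
      = String.ofList (s.toList.map (fun c => ps.foldl (fun c p => ctPairStep p c) c)) := by
  induction ps with
  | nil => intro s; simp
  | cons p rest ih =>
    intro s
    rw [List.foldl_cons, ct_str_step_eq, ih]
    simp only [String.toList_ofList]
    congr 1
    simp [List.map_map, Function.comp]

set_option maxRecDepth 8000 in
set_option maxHeartbeats 1600000 in
theorem ctStep_eq_fin : ∀ n : Fin 128, pvDomChar (Char.ofNat n.val) = true → ctStepA (Char.ofNat n.val) = ctStepB (Char.ofNat n.val) := by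
  decide

theorem ctStep_eq {c : Char} (h : pvDomChar c = true) : ctStepA c = ctStepB c := by
  have hlt : c.toNat < 128 := by
    simp [pvDomChar] at h
    omega
  have := ctStep_eq_fin ⟨c.toNat, hlt⟩ (by simpa [Char.ofNat_toNat] using h)
  simpa [Char.ofNat_toNat] using this

theorem ct_fold_eq_map (xs : List Char) : ∀ (pre : List Char),
    (PySem.List.enumerate xs (pre.length : Int)).foldl
      (fun st (p : Int × Char) =>
        if ctReplacements.contains p.2 then
          st.set p.1.toNat ((ctReplacements.get? p.2).getD p.2)
        else st)
      (pre ++ xs) = pre ++ xs.map ctStepA := by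
  induction xs with
  | nil => intro pre; simp [PySem.List.enumerate_nil]
  | cons x xs ih =>
    intro pre
    rw [PySem.List.enumerate_cons, List.foldl_cons]
    have hset : (if ctReplacements.contains x then
          (pre ++ x :: xs).set ((pre.length : Int)).toNat ((ctReplacements.get? x).getD x)
        else pre ++ x :: xs) = (pre ++ [ctStepA x]) ++ xs := by
      by_cases hc : ctReplacements.contains x
      · simp [hc, ctStepA, List.append_assoc]
      · simp [hc, ctStepA]
    rw [hset]
    have hlen : (pre.length : Int) + 1 = (((pre ++ [ctStepA x]).length : Nat) : Int) := by
      simp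
    rw [hlen, ih (pre ++ [ctStepA x])]
    simp

theorem change_token_eq_map (token : String) :
    change_token token = String.ofList (token.toList.map ctStepA) := by
  have h := ct_fold_eq_map token.toList []
  simp only [List.length_nil, Nat.cast_zero, List.nil_append] at h
  exact congrArg String.ofList h

-- ===== VERDICT (by name: the statement is the Claim_ definition above) =====
theorem ct_alt_eq_mapB (s : String) :
    ctPairs.foldl ctStrStep s = String.ofList (s.toList.map ctStepB) := by
  rw [ct_alt_eq_map]
  rfl
set_option maxRecDepth 8000 in
theorem change_token_spec : Claim_equal_change_token := by
  intro token hdom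
  unfold Spec_change_token
  rw [change_token_eq_map]
  unfold change_token_alt
  rw [ct_alt_eq_mapB]
  refine congrArg String.ofList ?_
  apply List.map_congr_left
  intro c hc
  have hdc : pvDomChar c = true := by
    have := (List.all_eq_true.mp hdom) c hc
    simpa using this
  exact ctStep_eq hdc
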